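-- pv_equiv track=rewrite | github.com/bedziox/Systemy-Multimedialne | L5/l5.py | countDifferent
-- ===== SOURCE A (Python) =====
-- def countDifferent(data):
--     counter = 1
--     for j in range(0, len(data) - 1):
--         if(data[j] != data[j+1]):
--             counter = counter + 1
--             if counter == 127:
--                 return counter
--         else:
--             break
--     return counter
-- ===== SOURCE B (Python) =====
-- def countDifferent(data):
--     # Stage 1: list ALL adjacent-equal positions (full pass, no counter, no early exit).
--     breaks = [i for i, (x, y) in enumerate(zip(data, data[1:])) if x == y]
--     # Stage 2: the run stops at the first break (or covers all pairs); cap in closed form.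
--     stop = breaks[0] if breaks else max(len(data) - 1, 0)
--     return min(stop + 1, 127)
-- ===== Notes on version B (the rewrite author's own statement) =====
-- stated objective: alternative
-- what changed: B replaces A's single counting loop with embedded cap and early returns by two staged passes: it first materialises the complete list of adjacent-equal positions from enumerate(zip(data, data[1:])), then derives the answer from that list's head by the closed form min(stop+1, 127); no counter and no early exit remain.
import Mathlib
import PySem

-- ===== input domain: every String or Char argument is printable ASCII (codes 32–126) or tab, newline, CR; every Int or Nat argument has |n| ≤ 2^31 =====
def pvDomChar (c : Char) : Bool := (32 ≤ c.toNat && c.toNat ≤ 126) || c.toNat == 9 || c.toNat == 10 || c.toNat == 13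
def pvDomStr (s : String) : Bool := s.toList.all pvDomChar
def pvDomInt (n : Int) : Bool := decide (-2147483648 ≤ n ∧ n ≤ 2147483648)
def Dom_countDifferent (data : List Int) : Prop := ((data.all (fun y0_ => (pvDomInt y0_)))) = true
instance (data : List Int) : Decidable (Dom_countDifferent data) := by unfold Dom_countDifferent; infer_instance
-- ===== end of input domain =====

-- B replaces A's counting loop (embedded cap, early return) by two staged passes:
-- collect all adjacent-equal positions, then take the head and apply min(stop+1,127);
-- objective: alternative decomposition of the same O(n) task.

-- ===== PORT A =====
-- the for-loop over range(0, len(data)-1) with counter and the inline counter==127 return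
def countDifferentLoop (data : List Int) : List Int → Int → Int
  | [], counter => counter
  | j :: js, counter =>
    if PySem.List.pyGet? data j ≠ PySem.List.pyGet? data (j + 1) then
      let counter := counter + 1
      if counter = 127 then counter else countDifferentLoop data js counter
    else counter

def countDifferent (data : List Int) : Int :=
  countDifferentLoop data (PySem.List.pyRange 0 ((data.length : Int) - 1) 1) 1

-- ===== PORT B =====
-- [i for i, (x, y) in enumerate(zip(data, data[1:])) if x == y]
def pvBreaks (data : List Int) : List Int :=
  (PySem.List.enumerate (data.zip (PySem.List.slice data (some 1) none)) 0).filterMap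
    (fun p => if p.2.1 = p.2.2 then some p.1 else none)

def countDifferent_alt (data : List Int) : Int :=
  let breaks := pvBreaks data
  let stop := match breaks with
    | [] => max ((data.length : Int) - 1) 0
    | b :: _ => b
  min (stop + 1) 127

-- ===== PRECONDITION & SPEC =====
def Spec_countDifferent (data : List Int) (out : Int) : Prop := out = countDifferent_alt data
instance (data : List Int) (out : Int) : Decidable (Spec_countDifferent data out) := by unfold Spec_countDifferent; infer_instance

-- ===== CLAIM (what is proved, stated in full; the proofs are below) =====
def Claim_equal_countDifferent : Prop := ∀ (data : List Int), Dom_countDifferent data → Spec_countDifferent data (countDifferent data)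

-- ===== LEMMAS AND PROOFS =====

-- index of the first adjacent-equal pair (= number of all pairs if none)
def fb : List Int → Nat
  | x :: y :: r => if x = y then 0 else 1 + fb (y :: r)
  | _ => 0

theorem fb_short (l : List Int) (h : l.length ≤ 1) : fb l = 0 := by
  match l, h with
  | [], _ => rfl
  | [_], _ => rfl

theorem enumerate_shift {α : Type} (l : List α) (s : Int) :
    PySem.List.enumerate l (s + 1) = (PySem.List.enumerate l s).map (fun p => (p.1 + 1, p.2)) := by
  induction l generalizing s with
  | nil => simp [PySem.List.enumerate_nil]
  | cons x xs ih =>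
    rw [PySem.List.enumerate_cons, PySem.List.enumerate_cons, List.map_cons, ih (s + 1)]

theorem pvBreaks_cons2 (x y : Int) (r : List Int) :
    pvBreaks (x :: y :: r) =
      if x = y then 0 :: (pvBreaks (y :: r)).map (· + 1)
      else (pvBreaks (y :: r)).map (· + 1) := by
  unfold pvBreaks
  rw [PySem.List.slice_from_one, PySem.List.slice_from_one]
  show (PySem.List.enumerate ((x, y) :: (y :: r).zip r) 0).filterMap _ = _
  rw [PySem.List.enumerate_cons, show (0 : Int) + 1 = 0 + 1 from rfl, enumerate_shift]
  simp only [List.filterMap_cons, List.filterMap_map]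
  have hcomm : ∀ l : List (Int × Int × Int),
      l.filterMap (fun p => if p.2.1 = p.2.2 then some (p.1 + 1) else none)
        = (l.filterMap (fun p => if p.2.1 = p.2.2 then some p.1 else none)).map (· + 1) := by
    intro l
    rw [List.map_filterMap]
    apply List.filterMap_congr; intro p _
    by_cases hp : p.2.1 = p.2.2 <;> simp [hp]
  by_cases h : x = y
  · simp [h, hcomm]
  · simp [h, hcomm]

-- B computes min(fb data + 1, 127)
theorem stop_eq_fb (l : List Int) :
    (pvBreaks l).headD (max ((l.length : Int) - 1) 0) = (fb l : Int) := by
  induction l using fb.induct with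
  | case1 y r =>
    rw [pvBreaks_cons2]
    simp [fb]
  | case2 x y r h ih =>
    rw [pvBreaks_cons2]
    simp only [h, if_false, fb]
    cases hb : pvBreaks (y :: r) with
    | nil =>
      rw [hb] at ih
      simp only [List.map_nil, List.headD_nil] at ih ⊢
      simp only [List.length_cons] at ih ⊢
      push_cast at ih ⊢
      omega
    | cons b bs =>
      rw [hb] at ih
      simp only [List.map_cons, List.headD_cons] at ih ⊢
      push_cast
      omega
  | case3 t ht =>
    match t, ht with
    | [], _ => decide
    | [x], _ =>
      have hx : pvBreaks [x] = [] := by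
        simp [pvBreaks, PySem.List.slice_from_one, PySem.List.enumerate_nil]
      rw [hx]
      simp [fb]
    | x :: y :: r, ht => exact absurd rfl (ht x y r)

-- B computes min(fb data + 1, 127)
theorem alt_eq_fb (data : List Int) :
    countDifferent_alt data = min ((fb data : Int) + 1) 127 := by
  have hmatch : (match pvBreaks data with
      | [] => max ((data.length : Int) - 1) 0
      | b :: _ => b) = (pvBreaks data).headD (max ((data.length : Int) - 1) 0) := by
    cases pvBreaks data <;> rfl
  simp only [countDifferent_alt]
  rw [hmatch, stop_eq_fb data]

-- A's loop on range(i, len-1) equals the capped count of leading unequal pairs of drop i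
theorem loopA (data : List Int) (i : Nat) (c : Int) (h1 : 1 ≤ c) (h2 : c ≤ 126) :
    countDifferentLoop data (PySem.List.pyRange (i : Int) ((data.length : Int) - 1) 1) c
      = min (c + (fb (data.drop i) : Int)) 127 := by
  by_cases h : (i : Int) < (data.length : Int) - 1
  · have hi1 : i + 1 < data.length := by omega
    have hi : i < data.length := by omega
    rw [PySem.List.pyRange_one_cons h]
    simp only [countDifferentLoop]
    rw [PySem.List.pyGet?_ofNat (xs := data) (n := i) hi,
        show (i : Int) + 1 = ((i + 1 : Nat) : Int) by push_cast; ring,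
        PySem.List.pyGet?_ofNat (xs := data) (n := i + 1) hi1]
    have hdrop : data.drop i = data[i] :: data[i+1] :: data.drop (i + 2) := by
      rw [List.drop_eq_getElem_cons hi, List.drop_eq_getElem_cons hi1]
    by_cases heq : data[i] = data[i+1]
    · simp only [heq, ne_eq, not_true_eq_false, if_false]
      rw [hdrop]
      simp [fb, heq]
      omega
    · have hne : ¬ (some data[i] = some data[i+1]) := by simp [heq]
      simp only [ne_eq, hne, not_false_iff, if_true]
      have hfb : fb (data.drop i) = 1 + fb (data.drop (i + 1)) := by
        rw [hdrop, fb, if_neg heq, List.drop_eq_getElem_cons hi1]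
      by_cases hcap : c + 1 = 127
      · simp only [hcap, if_true]
        rw [hfb]; omega
      · simp only [hcap, if_false]
        rw [loopA data (i + 1) (c + 1) (by omega) (by omega)]
        rw [hfb]
        push_cast
        omega
  · rw [PySem.List.pyRange_one_eq_nil (by omega)]
    have : (data.drop i).length ≤ 1 := by
      simp [List.length_drop]; omega
    rw [fb_short _ this]
    simp [countDifferentLoop]
    omega
termination_by data.length - i
decreasing_by omega

-- ===== VERDICT (by name: the statement is the Claim_ definition above) =====
theorem countDifferent_spec : Claim_equal_countDifferent := by
  intro data _
  unfold Spec_countDifferent countDifferent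
  rw [alt_eq_fb]
  have := loopA data 0 1 (by omega) (by omega)
  simp only [Nat.cast_zero, List.drop_zero] at this
  rw [this]
  omega
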